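-- pv_equiv track=rewrite | github.com/JohannFaustVIII/Angel | aoc/2022/d1.py | part1
-- ===== SOURCE A (Python) =====
-- def part1(lines : list[str]) -> tuple[int, int]:
--     calories = []
--     count = 0
--     for line in lines:
--         line = line.strip()
--         if line:
--             count += int(line)
--         else:
--             calories.append(count)
--             count = 0
--
--     if count != 0:
--         calories.append(count)
--
--     max_calories = max(calories)
--     calories.sort()
--     max_three = sum(calories[-3:])
--     return (max_calories, max_three)
-- ===== SOURCE B (Python) =====
-- def part1(lines: list[str]) -> tuple[int, int]:
--     # Single pass: fold each group total into a running list of the (at most)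
--     # three largest group sums instead of collecting every total and sorting.
--     top = []  # ascending, at most 3 elements
--     count = 0
--
--     def push(v):
--         i = 0
--         while i < len(top) and top[i] < v:
--             i += 1
--         top.insert(i, v)
--         if len(top) > 3:
--             top.pop(0)
--
--     for line in lines:
--         s = line.strip()
--         if s:
--             count += int(s)
--         else:
--             push(count)
--             count = 0
--     if count != 0:
--         push(count)
--     if not top:
--         raise ValueError("no calorie groups")
--     return (top[-1], sum(top))
-- ===== Notes on version B (the rewrite author's own statement) =====
-- stated objective: alternative
-- what changed: Instead of collecting all group totals, sorting the whole list and slicing its tail, B folds each group total into a running ascending list of at most three largest sums during the single parse pass.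
import Mathlib
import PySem

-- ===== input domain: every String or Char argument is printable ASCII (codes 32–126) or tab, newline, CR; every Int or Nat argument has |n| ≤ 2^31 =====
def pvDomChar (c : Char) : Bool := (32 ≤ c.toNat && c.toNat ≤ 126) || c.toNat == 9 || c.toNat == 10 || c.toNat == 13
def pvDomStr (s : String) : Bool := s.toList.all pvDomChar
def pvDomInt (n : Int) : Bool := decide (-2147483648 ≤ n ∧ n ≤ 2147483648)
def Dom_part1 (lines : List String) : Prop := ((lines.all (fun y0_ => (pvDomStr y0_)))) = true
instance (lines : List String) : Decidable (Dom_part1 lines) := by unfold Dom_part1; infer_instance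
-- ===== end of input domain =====

-- B folds each group total into a running list of the (at most) three largest sums
-- during the single parse pass, instead of collecting all totals, sorting and slicing
-- the tail (objective: alternative).


-- ===== PORT A =====
def part1 (lines : List String) : Int × Int :=
  let st := lines.foldl (fun (st : List Int × Int) line =>
      let cs := PySem.Chars.strip line.toList
      if cs ≠ [] then (st.1, st.2 + (PySem.Int.ofChars? cs).getD 0)
      else (st.1 ++ [st.2], 0)) ([], 0)
  let calories := if st.2 ≠ 0 then st.1 ++ [st.2] else st.1
  let maxCalories := (PySem.List.max? calories (fun x => x)).getD 0
  let sortedCal := PySem.List.sorted calories (fun x => x) false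
  let maxThree := (PySem.List.slice sortedCal (some (-3)) none).sum
  (maxCalories, maxThree)

-- ===== PORT B =====
-- the `while top[i] < v … insert(i, v)` of Source B's push
def insAsc (v : Int) : List Int → List Int
  | [] => [v]
  | x :: t => if x < v then x :: insAsc v t else v :: x :: t

-- Source B's push: insert keeping ascending order, then pop(0) if more than 3 remain
def push3 (top : List Int) (v : Int) : List Int :=
  let t := insAsc v top
  if 3 < t.length then t.tail else t

def part1_alt (lines : List String) : Int × Int :=
  let st := lines.foldl (fun (st : List Int × Int) line =>
      let cs := PySem.Chars.strip line.toList
      if cs ≠ [] then (st.1, st.2 + (PySem.Int.ofChars? cs).getD 0)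
      else (push3 st.1 st.2, 0)) ([], 0)
  let top := if st.2 ≠ 0 then push3 st.1 st.2 else st.1
  ((PySem.List.pyGet? top (-1)).getD 0, top.sum)

-- ===== PRECONDITION & SPEC =====
-- Pre_ excludes exactly the inputs on which A raises ValueError: a nonblank line that
-- int() rejects, and inputs producing no group at all (no blank line and the running
-- total ending at 0), where taking the maximum of an empty group list raises.
def Pre_part1 (lines : List String) : Prop :=
  (∀ s ∈ lines, PySem.Chars.strip s.toList ≠ [] →
      (PySem.Int.ofChars? (PySem.Chars.strip s.toList)).isSome) ∧
  ((∃ s ∈ lines, PySem.Chars.strip s.toList = []) ∨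
    (lines.map (fun s => (PySem.Int.ofChars? (PySem.Chars.strip s.toList)).getD 0)).sum ≠ 0)
instance (lines : List String) : Decidable (Pre_part1 lines) := by unfold Pre_part1; infer_instance

def pvWitness_part1 : List String := ["100", "200", "", "300", "", "50", "60", "", "400"]

def Spec_part1 (lines : List String) (out : Int × Int) : Prop := out = part1_alt lines
instance (lines : List String) (out : Int × Int) : Decidable (Spec_part1 lines out) := by unfold Spec_part1; infer_instance

-- ===== CLAIM (what is proved, stated in full; the proofs are below) =====
def Claim_equal_part1 : Prop := ∀ (lines : List String), Dom_part1 lines → Pre_part1 lines → Spec_part1 lines (part1 lines)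

-- ===== LEMMAS AND PROOFS =====

-- proof-only abbreviations: Python's ascending sort, and its insertion step
def sortI (cs : List Int) : List Int := PySem.List.sorted cs (fun x => x) false

def insB (v : Int) (ys : List Int) : List Int :=
  PySem.List.insertBy (fun a b => decide (a < b)) v ys

lemma insB_of_forall_le (v : Int) (t : List Int) (h : ∀ y ∈ t, v ≤ y) :
    insB v t = v :: t := by
  induction t with
  | nil => rfl
  | cons y t ih =>
    by_cases hvy : v < y
    · simp [insB, PySem.List.insertBy, hvy]
    · have hy : v ≤ y := h y (by simp)
      have hyv : y = v := le_antisymm (by omega) hy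
      have ht : insB v t = v :: t := ih (fun z hz => h z (by simp [hz]))
      simp only [insB, PySem.List.insertBy, hvy, decide_false, Bool.false_eq_true,
        if_false]
      rw [show PySem.List.insertBy (fun a b => decide (a < b)) v t = insB v t from rfl,
        ht, hyv]

-- on a sorted list, Source B's insert-before-first-≥ agrees with sorted's insert-after-≤
lemma insAsc_eq_insB (v : Int) (ys : List Int) (h : ys.Pairwise (· ≤ ·)) :
    insAsc v ys = insB v ys := by
  induction ys with
  | nil => rfl
  | cons x t ih =>
    rcases List.pairwise_cons.mp h with ⟨hx, ht⟩
    by_cases hxv : x < v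
    · have hvx : ¬ v < x := by omega
      simp only [insAsc, if_pos hxv, insB, PySem.List.insertBy, hvx, decide_false,
        Bool.false_eq_true, if_false]
      rw [show PySem.List.insertBy (fun a b => decide (a < b)) v t = insB v t from rfl,
        ← ih ht]
    · by_cases hvx : v < x
      · simp [insAsc, if_neg hxv, insB, PySem.List.insertBy, hvx]
      · have hx' : x = v := by omega
        have ht' : insB v t = v :: t :=
          insB_of_forall_le v t (by intro y hy; rw [← hx']; exact hx y hy)
        simp only [insAsc, if_neg hxv, insB, PySem.List.insertBy, hvx, decide_false,
          Bool.false_eq_true, if_false]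
        rw [show PySem.List.insertBy (fun a b => decide (a < b)) v t = insB v t from rfl,
          ht', hx']

lemma length_insB (v : Int) (ys : List Int) : (insB v ys).length = ys.length + 1 := by
  induction ys with
  | nil => rfl
  | cons x t ih =>
    simp only [insB, PySem.List.insertBy] at *
    split
    · simp
    · simp only [List.length_cons, ih]

-- pushing v into a full (length-3) suffix whose head is not below v drops v again
lemma push3_full_min (v a : Int) (r : List Int) (hr : r.length = 2) (ha : ¬ a < v) :
    push3 (a :: r) v = a :: r := by
  simp [push3, insAsc, ha, hr]

-- key step: pushing v into the 3-largest suffix of sorted ys tracks inserting v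
-- into ys and taking the 3-largest suffix again
lemma push3_step (v : Int) (ys : List Int) (h : ys.Pairwise (· ≤ ·)) :
    push3 (ys.drop (ys.length - 3)) v = (insB v ys).drop (ys.length - 2) := by
  induction ys with
  | nil => rfl
  | cons x t ih =>
    rcases List.pairwise_cons.mp h with ⟨hx, ht⟩
    by_cases hlen : (x :: t).length ≤ 3
    · rw [Nat.sub_eq_zero_of_le hlen, List.drop_zero]
      simp only [push3]
      rw [insAsc_eq_insB v _ h]
      have hl : (insB v (x :: t)).length = (x :: t).length + 1 := length_insB v _
      by_cases h3 : (x :: t).length = 3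
      · rw [if_pos (by omega)]
        rw [show (x :: t).length - 2 = 1 by omega, List.drop_one]
      · rw [if_neg (by omega)]
        rw [show (x :: t).length - 2 = 0 by simp at hlen h3 ⊢; omega, List.drop_zero]
    · push Not at hlen
      have htl : 3 ≤ t.length := by simp at hlen; omega
      rw [show (x :: t).length - 3 = (t.length - 3) + 1 by simp; omega,
        List.drop_succ_cons]
      by_cases hvx : v < x
      · have hlen3 : (t.drop (t.length - 3)).length = 3 := by
          rw [List.length_drop]; omega
        rcases hd : t.drop (t.length - 3) with _ | ⟨a, r⟩
        · rw [hd] at hlen3; simp at hlen3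
        · have hr : r.length = 2 := by rw [hd] at hlen3; simpa using hlen3
          have haT : a ∈ t := List.mem_of_mem_drop (by rw [hd]; simp)
          have hva : ¬ a < v := by have := hx a haT; omega
          rw [push3_full_min v a r hr hva]
          have hIns : insB v (x :: t) = v :: x :: t := by
            simp [insB, PySem.List.insertBy, hvx]
          rw [hIns, show (x :: t).length - 2 = (t.length - 3) + 2 by simp; omega]
          rw [List.drop_succ_cons, List.drop_succ_cons]
          exact hd.symm
      · have hIns : insB v (x :: t) = x :: insB v t := by
          simp only [insB, PySem.List.insertBy, hvx, decide_false, Bool.false_eq_true,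
            if_false]
        rw [hIns, show (x :: t).length - 2 = (t.length - 2) + 1 by simp; omega,
          List.drop_succ_cons]
        exact ih ht

-- folding Source B's push over the group totals computes the 3-largest suffix of sorted
lemma foldl_push3 (cs : List Int) :
    cs.foldl push3 [] = (sortI cs).drop (cs.length - 3) := by
  induction cs using List.reverseRecOn with
  | nil => rfl
  | append_singleton cs v ih =>
    rw [List.foldl_append, List.foldl_cons, List.foldl_nil, ih]
    have hS : sortI (cs ++ [v]) = insB v (sortI cs) := by
      simp only [sortI, PySem.List.sorted_eq_foldl_insertBy, List.foldl_append,
        List.foldl_cons, List.foldl_nil]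
      rfl
    have hlen : (sortI cs).length = cs.length := PySem.List.length_sorted _ _ _
    have hstep := push3_step v (sortI cs) (PySem.List.sorted_pairwise cs (fun x => x))
    rw [hlen] at hstep
    rw [hS, show (cs ++ [v]).length - 3 = cs.length - 2 by simp]
    exact hstep

-- the two parse folds run in lockstep: B's list state is the push3-fold of A's
lemma parse_lockstep (lines : List String) (cal : List Int) (cnt : Int) :
    lines.foldl (fun (st : List Int × Int) line =>
      let cs := PySem.Chars.strip line.toList
      if cs ≠ [] then (st.1, st.2 + (PySem.Int.ofChars? cs).getD 0)
      else (push3 st.1 st.2, 0)) (cal.foldl push3 [], cnt)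
    = (((lines.foldl (fun (st : List Int × Int) line =>
        let cs := PySem.Chars.strip line.toList
        if cs ≠ [] then (st.1, st.2 + (PySem.Int.ofChars? cs).getD 0)
        else (st.1 ++ [st.2], 0)) (cal, cnt)).1).foldl push3 [],
      (lines.foldl (fun (st : List Int × Int) line =>
        let cs := PySem.Chars.strip line.toList
        if cs ≠ [] then (st.1, st.2 + (PySem.Int.ofChars? cs).getD 0)
        else (st.1 ++ [st.2], 0)) (cal, cnt)).2) := by
  induction lines generalizing cal cnt with
  | nil => rfl
  | cons l ls ih =>
    simp only [List.foldl_cons]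
    by_cases hc : PySem.Chars.strip l.toList ≠ []
    · simp only [if_pos hc]; exact ih cal _
    · simp only [if_neg hc]
      rw [show push3 (cal.foldl push3 []) cnt = (cal ++ [cnt]).foldl push3 [] by
        rw [List.foldl_append]; rfl]
      exact ih (cal ++ [cnt]) 0

-- every member of an ascending list is at most its last element
lemma mem_le_getLast (l : List Int) (h : l.Pairwise (· ≤ ·)) (x L : Int)
    (hx : x ∈ l) (hL : l.getLast? = some L) : x ≤ L := by
  induction l with
  | nil => simp at hx
  | cons y t ih =>
    rcases List.pairwise_cons.mp h with ⟨hy, ht⟩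
    cases t with
    | nil =>
      simp at hx hL; omega
    | cons z t' =>
      rw [List.getLast?_cons_cons] at hL
      rcases List.mem_cons.mp hx with rfl | hx'
      · exact hy L (List.mem_of_getLast? hL)
      · exact ih ht hx' hL

-- the last element of the ascending sort is Python's max
lemma getLast_sorted_max (cs : List Int) (hcs : cs ≠ []) :
    (sortI cs).getLast?.getD 0 = (PySem.List.max? cs (fun x => x)).getD 0 := by
  obtain ⟨m, hm⟩ : ∃ m, PySem.List.max? cs (fun x => x) = some m := by
    cases hmx : PySem.List.max? cs (fun x => x) with
    | none => exact absurd ((PySem.List.max?_eq_none_iff cs _).mp hmx) hcs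
    | some m => exact ⟨m, rfl⟩
  have hs : sortI cs ≠ [] := by
    intro h0
    have := PySem.List.length_sorted cs (fun x => x) false
    rw [show PySem.List.sorted cs (fun x => x) false = sortI cs from rfl, h0] at this
    exact hcs (List.length_eq_zero_iff.mp this.symm)
  obtain ⟨L, hL⟩ : ∃ L, (sortI cs).getLast? = some L :=
    ⟨(sortI cs).getLast hs, List.getLast?_eq_some_getLast hs⟩
  have hLcs : L ∈ cs :=
    (PySem.List.mem_sorted cs _ false L).mp (List.mem_of_getLast? hL)
  have hmS : m ∈ sortI cs :=
    (PySem.List.mem_sorted cs _ false m).mpr (PySem.List.max?_mem hm)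
  have h1 : L ≤ m := PySem.List.max?_isMax hm L hLcs
  have h2 : m ≤ L :=
    mem_le_getLast (sortI cs) (PySem.List.sorted_pairwise cs (fun x => x)) m L hmS hL
  rw [hm, hL]
  simp; omega

-- xs[-1] on a nonempty list is its last element
lemma pyGet_neg_one (l : List Int) (hl : l ≠ []) :
    (PySem.List.pyGet? l (-1)).getD 0 = l.getLast?.getD 0 := by
  have hlen : 0 < l.length := List.length_pos_iff.mpr hl
  have h1 : PySem.List.pyIdx? l.length (-1) = some (l.length - 1) := by
    simp only [PySem.List.pyIdx?]
    rw [if_neg (by omega), if_pos (by omega)]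
    norm_num
  simp [PySem.List.pyGet?, h1, List.getLast?_eq_getElem?]

-- if lines contains a blank, A's list state ends nonempty
lemma foldA_blank_ne_nil (lines : List String) (cal : List Int) (cnt : Int) :
    ((∃ s ∈ lines, PySem.Chars.strip s.toList = []) ∨ cal ≠ []) →
    (lines.foldl (fun (st : List Int × Int) line =>
      let cs := PySem.Chars.strip line.toList
      if cs ≠ [] then (st.1, st.2 + (PySem.Int.ofChars? cs).getD 0)
      else (st.1 ++ [st.2], 0)) (cal, cnt)).1 ≠ [] := by
  induction lines generalizing cal cnt with
  | nil =>
    intro h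
    simp only [List.foldl_nil]
    rcases h with ⟨s, hs, _⟩ | h
    · simp at hs
    · exact h
  | cons l ls ih =>
    intro h
    simp only [List.foldl_cons]
    by_cases hc : PySem.Chars.strip l.toList ≠ []
    · simp only [if_pos hc]
      apply ih
      rcases h with ⟨s, hs, hbl⟩ | hcal
      · rcases List.mem_cons.mp hs with rfl | hs'
        · exact absurd hbl hc
        · exact Or.inl ⟨s, hs', hbl⟩
      · exact Or.inr hcal
    · simp only [if_neg hc]
      exact ih _ _ (Or.inr (by simp))

-- if no line is blank, A's fold just accumulates the total into the count
lemma foldA_no_blank (lines : List String) (cal : List Int) (cnt : Int)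
    (h : ∀ s ∈ lines, PySem.Chars.strip s.toList ≠ []) :
    lines.foldl (fun (st : List Int × Int) line =>
      let cs := PySem.Chars.strip line.toList
      if cs ≠ [] then (st.1, st.2 + (PySem.Int.ofChars? cs).getD 0)
      else (st.1 ++ [st.2], 0)) (cal, cnt)
    = (cal, cnt + (lines.map
        (fun s => (PySem.Int.ofChars? (PySem.Chars.strip s.toList)).getD 0)).sum) := by
  induction lines generalizing cnt with
  | nil => simp
  | cons l ls ih =>
    have hl : PySem.Chars.strip l.toList ≠ [] := h l (by simp)
    simp only [List.foldl_cons, if_pos hl]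
    rw [ih _ (fun s hs => h s (List.mem_cons_of_mem _ hs))]
    simp only [List.map_cons, List.sum_cons]
    rw [add_assoc]

-- ===== VERDICT (by name: the statement is the Claim_ definition above) =====
theorem part1_spec : Claim_equal_part1 := by
  unfold Claim_equal_part1
  intro lines _ hpre
  obtain ⟨hparse, hne⟩ := hpre
  unfold Spec_part1
  simp only [part1, part1_alt]
  have hP := parse_lockstep lines [] 0
  simp only [List.foldl_nil] at hP
  rw [hP]
  set stA := lines.foldl (fun (st : List Int × Int) line =>
      let cs := PySem.Chars.strip line.toList
      if cs ≠ [] then (st.1, st.2 + (PySem.Int.ofChars? cs).getD 0)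
      else (st.1 ++ [st.2], 0)) ([], 0) with hstA
  set cal := if stA.2 ≠ 0 then stA.1 ++ [stA.2] else stA.1 with hcal
  have htop : (if stA.2 ≠ 0 then push3 (stA.1.foldl push3 []) stA.2
      else stA.1.foldl push3 []) = cal.foldl push3 [] := by
    rw [hcal]
    by_cases h0 : stA.2 ≠ 0
    · rw [if_pos h0, if_pos h0, List.foldl_append]; rfl
    · rw [if_neg h0, if_neg h0]
  rw [htop, foldl_push3]
  have hcne : cal ≠ [] := by
    by_cases hb : ∃ s ∈ lines, PySem.Chars.strip s.toList = []
    · have h1 := foldA_blank_ne_nil lines [] 0 (Or.inl hb)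
      rw [← hstA] at h1
      rw [hcal]
      by_cases h0 : stA.2 ≠ 0
      · rw [if_pos h0]; simp
      · rw [if_neg h0]; exact h1
    · have hnb : ∀ s ∈ lines, PySem.Chars.strip s.toList ≠ [] := by
        intro s hs hbl; exact hb ⟨s, hs, hbl⟩
      rcases hne with hb' | hsum
      · exact absurd hb' hb
      · have h2 := foldA_no_blank lines [] 0 hnb
        rw [← hstA] at h2
        rw [hcal, h2]
        simp only [zero_add]
        rw [if_pos hsum]
        simp
  have hslen : (sortI cal).length = cal.length := PySem.List.length_sorted _ _ _
  have htne : (sortI cal).drop (cal.length - 3) ≠ [] := by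
    have hc1 : 0 < cal.length := List.length_pos_iff.mpr hcne
    intro h0
    have := congrArg List.length h0
    rw [List.length_drop, hslen] at this
    simp at this
    omega
  refine Prod.ext ?_ ?_
  · simp only
    rw [pyGet_neg_one _ htne, List.getLast?_drop]
    rw [if_neg (by rw [hslen]; have := List.length_pos_iff.mpr hcne; omega)]
    exact (getLast_sorted_max cal hcne).symm
  · simp only
    rw [PySem.List.slice_from_neg_ofNat _ 3 (by omega)]
    rw [show (PySem.List.sorted cal fun x => x) = sortI cal from rfl, hslen]
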